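-- pv_equiv track=rewrite | github.com/siyuanc2/codeseeker | reports/score_codeseeker_by_encounter.py | score_example
-- ===== SOURCE A (Python) =====
-- from typing import Any, List, Tuple
--
-- def score_example(targets: List[str], preds: List[str], score_prefix_only: bool = False) -> Tuple[int, int, int]:
--     """
--     Score a single example by calculating true positives, false positives, and false negatives.
--     """
--     true_positives = 0
--     false_positives = 0
--     false_negatives = 0
--     if score_prefix_only:
--         preds = [p[:3] for p in preds]
--         targets = [t[:3] for t in targets]
--     ref_set = set(targets)
--     pred_set = set(preds)
--     true_positives = len(ref_set & pred_set)
--     false_positives = len(pred_set - ref_set)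
--     false_negatives = len(ref_set - pred_set)
--     return true_positives, false_positives, false_negatives
-- ===== SOURCE B (Python) =====
-- def score_example(targets, preds, score_prefix_only=False):
--     """
--     Score a single example: sort the deduplicated targets and predictions and
--     count the common codes with a two-pointer merge over the two sorted lists;
--     FP/FN follow by subtraction from the deduplicated list sizes.
--     """
--     if score_prefix_only:
--         preds = [p[:3] for p in preds]
--         targets = [t[:3] for t in targets]
--     ref = sorted(set(targets))
--     pred = sorted(set(preds))
--     i = j = tp = 0
--     while i < len(ref) and j < len(pred):
--         if ref[i] == pred[j]:
--             tp += 1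
--             i += 1
--             j += 1
--         elif ref[i] < pred[j]:
--             i += 1
--         else:
--             j += 1
--     return tp, len(pred) - tp, len(ref) - tp
-- ===== Notes on version B (the rewrite author's own statement) =====
-- stated objective: alternative
-- what changed: Replaces A's hash-set algebra (intersection and two set differences) by sorting the two deduplicated lists and counting common elements with a two-pointer merge, deriving false positives and false negatives by subtraction.
import Mathlib
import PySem

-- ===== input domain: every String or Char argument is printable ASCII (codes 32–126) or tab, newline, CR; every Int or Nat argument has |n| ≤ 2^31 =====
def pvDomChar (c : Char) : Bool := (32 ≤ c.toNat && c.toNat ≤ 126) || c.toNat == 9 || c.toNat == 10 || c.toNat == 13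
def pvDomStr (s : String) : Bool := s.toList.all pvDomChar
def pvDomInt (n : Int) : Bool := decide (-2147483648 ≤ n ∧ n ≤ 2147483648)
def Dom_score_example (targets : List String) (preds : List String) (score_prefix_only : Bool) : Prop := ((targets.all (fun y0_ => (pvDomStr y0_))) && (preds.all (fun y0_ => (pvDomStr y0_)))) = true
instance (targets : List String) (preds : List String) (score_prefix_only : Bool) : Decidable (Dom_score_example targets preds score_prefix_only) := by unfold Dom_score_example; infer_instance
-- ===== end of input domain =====

-- B replaces A's hash-set algebra (∩ and two set differences) by sorting the two
-- deduplicated lists and counting common elements with a two-pointer merge,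
-- deriving FP/FN by subtraction; objective: alternative algorithm.

-- ===== PORT A =====
def score_example (targets : List String) (preds : List String) (score_prefix_only : Bool) : Int × Int × Int :=
  let preds := if score_prefix_only then preds.map (fun p => PySem.Str.slice p none (some 3)) else preds
  let targets := if score_prefix_only then targets.map (fun t => PySem.Str.slice t none (some 3)) else targets
  let ref_set : PySem.Set String := PySem.Set.ofList targets
  let pred_set : PySem.Set String := PySem.Set.ofList preds
  let true_positives := PySem.Set.len (PySem.Set.inter ref_set pred_set)
  let false_positives := PySem.Set.len (PySem.Set.diff pred_set ref_set)
  let false_negatives := PySem.Set.len (PySem.Set.diff ref_set pred_set)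
  (true_positives, false_positives, false_negatives)

-- ===== PORT B =====
-- the two-pointer merge loop of Source B, as structural recursion on the two sorted lists
def pvMergeTP : List String → List String → Int
  | [], _ => 0
  | _ :: _, [] => 0
  | a :: as, b :: bs =>
    if a = b then 1 + pvMergeTP as bs
    else if a < b then pvMergeTP as (b :: bs)
    else pvMergeTP (a :: as) bs
termination_by xs ys => xs.length + ys.length

def score_example_alt (targets : List String) (preds : List String) (score_prefix_only : Bool) : Int × Int × Int :=
  let preds := if score_prefix_only then preds.map (fun p => PySem.Str.slice p none (some 3)) else preds
  let targets := if score_prefix_only then targets.map (fun t => PySem.Str.slice t none (some 3)) else targets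
  let ref := PySem.List.sorted (PySem.Set.ofList targets) (fun x => x) false
  let pred := PySem.List.sorted (PySem.Set.ofList preds) (fun x => x) false
  let tp := pvMergeTP ref pred
  (tp, (pred.length : Int) - tp, (ref.length : Int) - tp)

-- ===== PRECONDITION & SPEC =====
def Spec_score_example (targets : List String) (preds : List String) (score_prefix_only : Bool) (out : Int × Int × Int) : Prop := out = score_example_alt targets preds score_prefix_only
instance (targets : List String) (preds : List String) (score_prefix_only : Bool) (out : Int × Int × Int) : Decidable (Spec_score_example targets preds score_prefix_only out) := by unfold Spec_score_example; infer_instance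

-- ===== CLAIM (what is proved, stated in full; the proofs are below) =====
def Claim_equal_score_example : Prop := ∀ (targets : List String) (preds : List String) (score_prefix_only : Bool), Dom_score_example targets preds score_prefix_only → Spec_score_example targets preds score_prefix_only (score_example targets preds score_prefix_only)

-- ===== LEMMAS AND PROOFS =====

-- on strictly increasing lists the merge counts exactly the elements of the first list that occur in the second
theorem pvMergeTP_eq_filter (a b : List String)
    (ha : a.Pairwise (· < ·)) (hb : b.Pairwise (· < ·)) :
    pvMergeTP a b = ((a.filter (fun x => x ∈ b)).length : Int) := by
  fun_induction pvMergeTP a b with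
  | case1 b => simp
  | case2 x xs => simp
  | case3 xs y ys ih =>
    have hx : ∀ z ∈ xs, z ≠ y := fun z hz => ne_of_gt (List.rel_of_pairwise_cons ha hz)
    have hf : xs.filter (fun z => decide (z = y ∨ z ∈ ys)) = xs.filter (fun z => decide (z ∈ ys)) := by
      apply List.filter_congr
      intro z hz
      simp [hx z hz]
    simp only [List.filter_cons, List.mem_cons, decide_true, true_or, if_pos, hf,
      List.length_cons]
    rw [ih ha.tail hb.tail]
    push_cast; ring
  | case4 x xs y ys hne hlt ih =>
    have hx : x ∉ y :: ys := by
      intro hmem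
      rcases List.mem_cons.mp hmem with h | h
      · exact hne h
      · exact absurd hlt (not_lt.mpr (le_of_lt (List.rel_of_pairwise_cons hb h)))
    simp only [List.filter_cons, hx, decide_false, if_neg, Bool.false_eq_true,
      not_false_eq_true]
    exact ih ha.tail hb
  | case5 x xs y ys hne hnlt ih =>
    have hylt : y < x := lt_of_le_of_ne (not_lt.mp hnlt) (fun h => hne h.symm)
    have : (x :: xs).filter (fun z => decide (z ∈ y :: ys)) =
        (x :: xs).filter (fun z => decide (z ∈ ys)) := by
      apply List.filter_congr
      intro z hz
      have hzy : z ≠ y := by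
        rcases List.mem_cons.mp hz with h | h
        · exact h ▸ ne_of_gt hylt
        · exact ne_of_gt (lt_trans hylt (List.rel_of_pairwise_cons ha h))
      simp [List.mem_cons, hzy]
    rw [this, ih ha hb.tail]

-- counting s-elements in t equals counting t-elements in s, for duplicate-free lists
theorem pv_filter_mem_comm (s t : List String) (hs : s.Nodup) (ht : t.Nodup) :
    (s.filter (fun x => x ∈ t)).length = (t.filter (fun x => x ∈ s)).length := by
  rw [← List.toFinset_card_of_nodup (hs.filter _), ← List.toFinset_card_of_nodup (ht.filter _),
    List.toFinset_filter, List.toFinset_filter]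
  congr 1
  ext x
  simp only [Finset.mem_filter, List.mem_toFinset, decide_eq_true_iff]
  tauto

-- set difference length = total length minus intersection-filter length
theorem pv_diff_len (s t : PySem.Set String) :
    (PySem.Set.diff s t).length = s.length - (PySem.Set.inter s t).length := by
  simp only [PySem.Set.diff, PySem.Set.inter]
  have := (List.length_eq_length_filter_add (l := s) (fun x => t.contains x)).symm
  omega

-- ===== VERDICT (by name: the statement is the Claim_ definition above) =====
theorem score_example_spec : Claim_equal_score_example := by
  intro targets preds sp _
  unfold Spec_score_example score_example score_example_alt
  simp only
  set ts := if sp then targets.map (fun t => PySem.Str.slice t none (some 3)) else targets with hts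
  set ps := if sp then preds.map (fun p => PySem.Str.slice p none (some 3)) else preds with hps
  set ref : PySem.Set String := PySem.Set.ofList ts with href
  set pred : PySem.Set String := PySem.Set.ofList ps with hpred
  set sref := PySem.List.sorted ref (fun x => x) false with hsref
  set spred := PySem.List.sorted pred (fun x => x) false with hspred
  -- the merge over the sorted lists counts the intersection
  have hmerge : pvMergeTP sref spred = ((sref.filter (fun x => x ∈ spred)).length : Int) :=
    pvMergeTP_eq_filter _ _ (PySem.List.sorted_ofList_pairwise_lt ts)
      (PySem.List.sorted_ofList_pairwise_lt ps)
  -- replace membership in the sorted list by membership in the set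
  have hpredm : sref.filter (fun x => x ∈ spred) = sref.filter (fun x => x ∈ pred) := by
    apply List.filter_congr
    intro x _
    simp [hspred, PySem.List.mem_sorted]

  -- filtering a permutation preserves the count
  have hperm : (sref.filter (fun x => x ∈ pred)).length = (ref.filter (fun x => x ∈ pred)).length :=
    ((PySem.List.sorted_perm ref (fun x => x) false).filter _).length_eq
  -- A's contains vs membership
  have hcont : ∀ (u v : PySem.Set String),
      u.filter (fun x => PySem.Set.contains v x) = u.filter (fun x => decide (x ∈ v)) := by
    intro u v
    apply List.filter_congr
    intro x _
    simp
  have hnr : ref.Nodup := PySem.Set.nodup_ofList ts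
  have hnp : pred.Nodup := PySem.Set.nodup_ofList ps
  have hcomm := pv_filter_mem_comm ref pred hnr hnp
  have hcomm' := pv_filter_mem_comm pred ref hnp hnr
  have htp : pvMergeTP sref spred = ((PySem.Set.inter ref pred).length : Int) := by
    rw [hmerge, hpredm]
    simp only [PySem.Set.inter, hcont]
    exact_mod_cast hperm
  have h1 := pv_diff_len pred ref
  have h2 := pv_diff_len ref pred
  have hlsr : sref.length = ref.length := PySem.List.length_sorted ref (fun x => x) false
  have hlsp : spred.length = pred.length := PySem.List.length_sorted pred (fun x => x) false
  have hle1 : (pred.filter (fun x => decide (x ∈ ref))).length ≤ pred.length :=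
    List.length_filter_le _ _
  have hle2 : (ref.filter (fun x => decide (x ∈ pred))).length ≤ ref.length :=
    List.length_filter_le _ _
  refine Prod.ext ?_ (Prod.ext ?_ ?_) <;>
    simp only [PySem.Set.len, htp, h1, h2, hlsr, hlsp, PySem.Set.inter, hcont] at * <;>
    omega
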